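-- pv_equiv track=rewrite | github.com/Zeeeepa/code-scalpel | src/code_scalpel/security/dependencies/typosquatting_detector.py | _is_transposition
-- ===== SOURCE A (Python) =====
-- def _is_transposition(name1: str, name2: str) -> bool:
--     """Check if one name is a transposition of the other."""
--     if len(name1) != len(name2):
--         return False
--
--     diff_positions = [i for i, (c1, c2) in enumerate(zip(name1, name2)) if c1 != c2]
--
--     # Transposition means exactly 2 adjacent positions differ
--     if len(diff_positions) == 2:
--         i, j = diff_positions
--         if j == i + 1:  # Adjacent
--             # Check if they're swapped
--             return name1[i] == name2[j] and name1[j] == name2[i]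
--
--     return False
-- ===== SOURCE B (Python) =====
-- def _is_transposition(name1: str, name2: str) -> bool:
--     """Check if one name is an adjacent-swap transposition of the other."""
--     n = len(name1)
--     if n != len(name2):
--         return False
--     # find first mismatch
--     i = 0
--     while i < n and name1[i] == name2[i]:
--         i += 1
--     if i + 1 >= n:
--         return False
--     # verify the swap locally, then the tails must match
--     return (name1[i] == name2[i + 1]
--             and name1[i + 1] == name2[i]
--             and name1[i + 2:] == name2[i + 2:])
-- ===== Notes on version B (the rewrite author's own statement) =====
-- stated objective: simpler
-- what changed: A builds the full list of all differing positions via an enumerate(zip(...)) comprehension and then inspects its length and contents; B stops at the first mismatch, checks the adjacent swap locally at that position, and compares the remaining tails with a single slice equality.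
import Mathlib
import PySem

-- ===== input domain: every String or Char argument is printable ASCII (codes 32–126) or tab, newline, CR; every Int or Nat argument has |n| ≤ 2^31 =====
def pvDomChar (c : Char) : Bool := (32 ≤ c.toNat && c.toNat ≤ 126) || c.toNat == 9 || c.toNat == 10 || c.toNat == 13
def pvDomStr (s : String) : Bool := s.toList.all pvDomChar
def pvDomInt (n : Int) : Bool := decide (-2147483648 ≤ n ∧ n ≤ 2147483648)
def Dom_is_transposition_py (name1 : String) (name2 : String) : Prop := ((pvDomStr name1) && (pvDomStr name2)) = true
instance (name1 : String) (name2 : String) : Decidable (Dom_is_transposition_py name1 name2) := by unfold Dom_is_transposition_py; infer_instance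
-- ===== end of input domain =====

-- B replaces A's "collect every differing position into a list, then inspect it" with
-- "walk to the first mismatch, check the swap locally, compare the tails" (objective: simpler).

-- ===== PORT A =====
-- diff_positions = [i for i, (c1, c2) in enumerate(zip(name1, name2)) if c1 != c2]
def pvDiffZ (zs : List (Char × Char)) (s : Int) : List Int :=
  ((PySem.List.enumerate zs s).filter (fun p => p.2.1 != p.2.2)).map Prod.fst

-- if len(diff_positions) == 2: i, j = diff_positions; if j == i + 1: return name1[i] == name2[j] and name1[j] == name2[i]; return False
def pvCheckAdj (l1 l2 : List Char) : List Int → Bool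
  | [i, j] =>
    if j = i + 1 then
      (PySem.List.pyGetD l1 i ' ' == PySem.List.pyGetD l2 j ' ') &&
      (PySem.List.pyGetD l1 j ' ' == PySem.List.pyGetD l2 i ' ')
    else false
  | _ => false

def is_transposition_py (name1 : String) (name2 : String) : Bool :=
  if name1.toList.length ≠ name2.toList.length then false
  else pvCheckAdj name1.toList name2.toList (pvDiffZ (name1.toList.zip name2.toList) 0)

-- ===== PORT B =====
-- the while loop walking both strings in lock-step to the first mismatch, then the
-- local swap check at i, i+1 and the tail comparison name1[i+2:] == name2[i+2:]
def pvScan : List Char → List Char → Bool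
  | a :: as, b :: bs =>
    if a = b then pvScan as bs
    else
      match as, bs with
      | a2 :: as2, b2 :: bs2 => (a == b2) && (a2 == b) && (as2 == bs2)
      | _, _ => false
  | _, _ => false

def is_transposition_py_alt (name1 : String) (name2 : String) : Bool :=
  if name1.toList.length ≠ name2.toList.length then false
  else pvScan name1.toList name2.toList

-- ===== PRECONDITION & SPEC =====
def Spec_is_transposition_py (name1 : String) (name2 : String) (out : Bool) : Prop := out = is_transposition_py_alt name1 name2
instance (name1 : String) (name2 : String) (out : Bool) : Decidable (Spec_is_transposition_py name1 name2 out) := by unfold Spec_is_transposition_py; infer_instance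

-- ===== CLAIM (what is proved, stated in full; the proofs are below) =====
def Claim_equal_is_transposition_py : Prop := ∀ (name1 : String) (name2 : String), Dom_is_transposition_py name1 name2 → Spec_is_transposition_py name1 name2 (is_transposition_py name1 name2)

-- ===== LEMMAS AND PROOFS =====

theorem pvCheckAdj_nil (l1 l2 : List Char) : pvCheckAdj l1 l2 [] = false := rfl
theorem pvCheckAdj_one (l1 l2 : List Char) (i : Int) : pvCheckAdj l1 l2 [i] = false := rfl
theorem pvCheckAdj_two (l1 l2 : List Char) (i j : Int) :
    pvCheckAdj l1 l2 [i, j] =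
      if j = i + 1 then
        (PySem.List.pyGetD l1 i ' ' == PySem.List.pyGetD l2 j ' ') &&
        (PySem.List.pyGetD l1 j ' ' == PySem.List.pyGetD l2 i ' ')
      else false := rfl
theorem pvCheckAdj_big (l1 l2 : List Char) (i j k : Int) (t : List Int) :
    pvCheckAdj l1 l2 (i :: j :: k :: t) = false := rfl

theorem pvScan_cons_eq (a : Char) (as bs : List Char) :
    pvScan (a :: as) (a :: bs) = pvScan as bs := by simp [pvScan]
theorem pvScan_single (a b : Char) : pvScan [a] [b] = false := by
  by_cases h : a = b <;> simp [pvScan, h]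
theorem pvScan_mismatch (a b a2 b2 : Char) (as2 bs2 : List Char) (hab : a ≠ b) :
    pvScan (a :: a2 :: as2) (b :: b2 :: bs2) =
      ((a == b2) && (a2 == b) && (as2 == bs2)) := by simp [pvScan, hab]

theorem pvDiffZ_nil (s : Int) : pvDiffZ [] s = [] := by
  simp [pvDiffZ, PySem.List.enumerate_nil]

theorem pvDiffZ_cons (a b : Char) (zs : List (Char × Char)) (s : Int) :
    pvDiffZ ((a, b) :: zs) s =
      if a = b then pvDiffZ zs (s + 1) else s :: pvDiffZ zs (s + 1) := by
  by_cases h : a = b <;>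
    simp [pvDiffZ, PySem.List.enumerate_cons, h]

theorem pvDiffZ_shift (zs : List (Char × Char)) (s : Int) :
    pvDiffZ zs (s + 1) = (pvDiffZ zs s).map (· + 1) := by
  induction zs generalizing s with
  | nil => simp [pvDiffZ_nil]
  | cons p zs ih =>
    obtain ⟨a, b⟩ := p
    by_cases h : a = b <;> simp [pvDiffZ_cons, h, ih]

theorem pvDiffZ_nonneg (zs : List (Char × Char)) (s i : Int) (h : i ∈ pvDiffZ zs s) : s ≤ i := by
  induction zs generalizing s with
  | nil => simp [pvDiffZ_nil] at h
  | cons p zs ih =>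
    obtain ⟨a, b⟩ := p
    rw [pvDiffZ_cons] at h
    by_cases hab : a = b
    · rw [if_pos hab] at h
      have := ih (s + 1) h; omega
    · rw [if_neg hab, List.mem_cons] at h
      rcases h with h | h
      · omega
      · have := ih (s + 1) h; omega

theorem pvDiffZ_eq_nil_iff (l1 l2 : List Char) (hlen : l1.length = l2.length) (s : Int) :
    pvDiffZ (l1.zip l2) s = [] ↔ l1 = l2 := by
  induction l1 generalizing l2 s with
  | nil => cases l2 <;> simp_all [pvDiffZ_nil]
  | cons a as ih =>
    cases l2 with
    | nil => simp at hlen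
    | cons b bs =>
      simp only [List.zip_cons_cons, pvDiffZ_cons]
      by_cases h : a = b
      · subst h
        simpa using ih bs (by simpa using hlen) (s + 1)
      · simp [h]

theorem pvGetD_cons_succ (x : Char) (l : List Char) (i : Int) (h : 0 ≤ i) :
    PySem.List.pyGetD (x :: l) (i + 1) ' ' = PySem.List.pyGetD l i ' ' := by
  obtain ⟨n, rfl⟩ := Int.eq_ofNat_of_zero_le h
  rw [show ((n : Int) + 1) = ((n + 1 : Nat) : Int) from by push_cast; ring,
    PySem.List.pyGetD_natCast, PySem.List.pyGetD_natCast]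
  simp

-- A's "exactly two adjacent diff positions, swapped" check equals B's first-mismatch scan.
theorem pvCheckAdj_eq_scan (l1 l2 : List Char) (hlen : l1.length = l2.length) :
    pvCheckAdj l1 l2 (pvDiffZ (l1.zip l2) 0) = pvScan l1 l2 := by
  induction l1 generalizing l2 with
  | nil =>
    cases l2 with
    | nil => rfl
    | cons b bs => simp at hlen
  | cons a as ih =>
    cases l2 with
    | nil => simp at hlen
    | cons b bs =>
      have hlen' : as.length = bs.length := by simpa using hlen
      rw [List.zip_cons_cons, pvDiffZ_cons]
      by_cases hab : a = b
      · -- heads equal: both sides reduce to the tails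
        subst hab
        rw [if_pos rfl, pvDiffZ_shift, pvScan_cons_eq, ← ih bs hlen']
        rcases h : pvDiffZ (as.zip bs) 0 with _ | ⟨i, _ | ⟨j, _ | ⟨k, t⟩⟩⟩ <;>
          simp only [List.map_nil, List.map_cons]
        · rw [pvCheckAdj_nil, pvCheckAdj_nil]
        · rw [pvCheckAdj_one, pvCheckAdj_one]
        · -- two positions: shift the indices by one
          have hi : 0 ≤ i := pvDiffZ_nonneg (as.zip bs) 0 i (by simp [h])
          have hj : 0 ≤ j := pvDiffZ_nonneg (as.zip bs) 0 j (by simp [h])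
          rw [pvCheckAdj_two, pvCheckAdj_two]
          by_cases hji : j = i + 1
          · rw [if_pos (by omega : j + 1 = i + 1 + 1), if_pos hji,
              pvGetD_cons_succ a as i hi, pvGetD_cons_succ a as j hj,
              pvGetD_cons_succ a bs i hi, pvGetD_cons_succ a bs j hj]
          · rw [if_neg (by omega : ¬ (j + 1 = i + 1 + 1)), if_neg hji]
        · rw [pvCheckAdj_big, pvCheckAdj_big]
      · -- first mismatch at the heads
        rw [if_neg hab, pvDiffZ_shift]
        cases as with
        | nil =>
          cases bs with
          | cons b2 bs2 => simp at hlen'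
          | nil =>
            rw [show (([] : List Char).zip ([] : List Char)) = [] from rfl, pvDiffZ_nil,
              List.map_nil, pvCheckAdj_one, pvScan_single]
        | cons a2 as2 =>
          cases bs with
          | nil => simp at hlen'
          | cons b2 bs2 =>
            have hlen2 : as2.length = bs2.length := by simpa using hlen'
            rw [pvScan_mismatch a b a2 b2 as2 bs2 hab, List.zip_cons_cons, pvDiffZ_cons]
            by_cases h2 : a2 = b2
            · -- only one early mismatch: A is false, and B's swap check cannot fire either
              subst h2
              have hRfalse : ((a == a2) && (a2 == b) && (as2 == bs2)) = false := by
                refine Bool.eq_false_iff.mpr (fun hc => ?_)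
                simp only [Bool.and_eq_true, beq_iff_eq] at hc
                exact hab (hc.1.1.trans hc.1.2)
              rw [if_pos rfl, pvDiffZ_shift, hRfalse]
              rcases h : pvDiffZ (as2.zip bs2) 0 with _ | ⟨i, t⟩
              · simp only [List.map_nil, List.map_cons]
                rw [pvCheckAdj_one]
              · cases t with
                | nil =>
                  have hi : 0 ≤ i := pvDiffZ_nonneg (as2.zip bs2) 0 i (by simp [h])
                  simp only [List.map_nil, List.map_cons]
                  rw [pvCheckAdj_two, if_neg (by omega : ¬ (i + 1 + 1 = 0 + 1))]
                | cons k t' =>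
                  simp only [List.map_cons]
                  rw [pvCheckAdj_big]
            · -- the two mismatches are adjacent: A's swap check vs B's swap check
              rw [if_neg h2, pvDiffZ_shift]
              rcases h : pvDiffZ (as2.zip bs2) 0 with _ | ⟨i, t⟩
              · have htail : as2 = bs2 := (pvDiffZ_eq_nil_iff as2 bs2 hlen2 0).mp h
                subst htail
                simp only [List.map_nil, List.map_cons]
                rw [pvCheckAdj_two, if_pos (rfl : (0 : Int) + 1 = 0 + 1),
                  pvGetD_cons_succ a (a2 :: as2) 0 (by omega),
                  pvGetD_cons_succ b (b2 :: as2) 0 (by omega)]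
                simp [PySem.List.pyGetD_zero_cons]
              · have hne : as2 ≠ bs2 := by
                  intro he
                  rw [(pvDiffZ_eq_nil_iff as2 bs2 hlen2 0).mpr he] at h
                  simp at h
                cases t with
                | nil =>
                  simp only [List.map_nil, List.map_cons]
                  rw [pvCheckAdj_big]
                  simp [hne]
                | cons k t' =>
                  simp only [List.map_cons]
                  rw [pvCheckAdj_big]
                  simp [hne]

-- ===== VERDICT (by name: the statement is the Claim_ definition above) =====
theorem is_transposition_py_spec : Claim_equal_is_transposition_py := by
  intro name1 name2 _
  show is_transposition_py name1 name2 = is_transposition_py_alt name1 name2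
  unfold is_transposition_py is_transposition_py_alt
  by_cases hlen : name1.toList.length = name2.toList.length
  · rw [if_neg (not_not_intro hlen), if_neg (not_not_intro hlen)]
    exact pvCheckAdj_eq_scan name1.toList name2.toList hlen
  · rw [if_pos hlen, if_pos hlen]
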